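-- pv_equiv track=rewrite | github.com/kulraghav/CodePractice | practice.py | lonely_pixels
-- ===== SOURCE A (Python) =====
-- from collections import defaultdict
-- from collections import defaultdict
-- from collections import defaultdict
-- from collections import defaultdict
-- from collections import defaultdict
-- from collections import defaultdict
--
-- def lonely_pixels(M):
--     if not M:
--         return 0
--     all_bs = []
--     rows = defaultdict(list)
--     columns = defaultdict(list)
--     for i in range(len(M)):
--         for j in range(len(M[0])):
--             if M[i][j] == 'B':
--                 rows[i].append((i,j))
--                 columns[j].append((i,j))
--                 all_bs.append((i,j))
--
--     for key in rows:
--         if len(rows[key]) > 1: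
--             for (i, j) in rows[key]:
--                 all_bs.remove((i,j))
--
--     for key in columns:
--         if len(columns[key]) > 1:
--             for (i,j) in columns[key]:
--                 all_bs.remove((i,j))
--
--     return all_bs
-- ===== SOURCE B (Python) =====
-- def lonely_pixels(M):
--     if not M:
--         return []
--     w = len(M[0])
--     row_count = [0] * len(M)
--     col_count = [0] * w
--     for i, row in enumerate(M):
--         for j in range(w):
--             if row[j] == 'B':
--                 row_count[i] += 1
--                 col_count[j] += 1
--     return [(i, j)
--             for i, row in enumerate(M)
--             for j in range(w)
--             if row[j] == 'B' and row_count[i] == 1 and col_count[j] == 1]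
-- ===== Notes on version B (the rewrite author's own statement) =====
-- stated objective: alternative
-- what changed: B replaces A's dict-of-pixel-groups plus repeated list.remove passes by two flat row/column B-counter arrays filled in one pass and a single comprehension keeping pixels whose both counts are 1.
-- outside the precondition, e.g. on lonely_pixels([]): A returns 0, B returns []
import Mathlib
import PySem

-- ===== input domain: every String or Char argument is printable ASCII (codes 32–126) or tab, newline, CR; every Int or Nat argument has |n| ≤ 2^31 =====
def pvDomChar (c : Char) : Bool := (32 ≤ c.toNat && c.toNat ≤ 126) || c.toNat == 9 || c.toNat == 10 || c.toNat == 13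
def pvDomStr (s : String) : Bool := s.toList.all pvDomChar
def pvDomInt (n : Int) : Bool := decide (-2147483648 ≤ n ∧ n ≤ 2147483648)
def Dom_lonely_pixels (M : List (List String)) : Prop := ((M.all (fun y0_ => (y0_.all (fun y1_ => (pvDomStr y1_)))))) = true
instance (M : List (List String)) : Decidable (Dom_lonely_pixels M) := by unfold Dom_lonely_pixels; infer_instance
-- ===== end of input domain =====

-- B replaces A's dict-of-pixel-groups plus repeated list.remove passes by two flat row/column
-- B-counter arrays filled in one pass and a single comprehension (alternative algorithm).

-- ===== PORT A =====
def lonely_pixels (M : List (List String)) : List (Int × Int) :=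
  if M = [] then []   -- Python returns the int 0 here (not a list); excluded by Pre_lonely_pixels
  else
    let s :=
      (PySem.List.pyRange 0 (M.length : Int) 1).foldl (fun s i =>
        (PySem.List.pyRange 0 ((PySem.List.pyGetD M 0 []).length : Int) 1).foldl (fun s j =>
          if PySem.List.pyGetD (PySem.List.pyGetD M i []) j "" = "B" then
            (s.1 ++ [(i, j)],
             s.2.1.modify i [] (· ++ [(i, j)]),
             s.2.2.modify j [] (· ++ [(i, j)]))
          else s) s)
        (([] : List (Int × Int)),
         (PySem.Dict.empty : PySem.Dict Int (List (Int × Int))),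
         (PySem.Dict.empty : PySem.Dict Int (List (Int × Int))))
    let bs1 := s.2.1.items.foldl (fun bs kv =>
        if 1 < kv.2.length then
          kv.2.foldl (fun bs p => (PySem.List.remove? bs p).getD bs) bs   -- remove? = none is Python's ValueError; outside Pre_
        else bs) s.1
    s.2.2.items.foldl (fun bs kv =>
        if 1 < kv.2.length then
          kv.2.foldl (fun bs p => (PySem.List.remove? bs p).getD bs) bs
        else bs) bs1

-- ===== PORT B =====
def lonely_pixels_alt (M : List (List String)) : List (Int × Int) :=
  if M = [] then []
  else
    let w := (PySem.List.pyGetD M 0 []).length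
    let cnt :=
      (PySem.List.enumerate M).foldl (fun s ir =>
        (PySem.List.pyRange 0 (w : Int) 1).foldl (fun s j =>
          if PySem.List.pyGetD ir.2 j "" = "B" then
            (PySem.List.pySetD s.1 ir.1 (PySem.List.pyGetD s.1 ir.1 0 + 1),
             PySem.List.pySetD s.2 j (PySem.List.pyGetD s.2 j 0 + 1))
          else s) s)
        (List.replicate M.length (0 : Int), List.replicate w (0 : Int))
    (PySem.List.enumerate M).foldl (fun acc ir =>
      (PySem.List.pyRange 0 (w : Int) 1).foldl (fun acc j =>
        if PySem.List.pyGetD ir.2 j "" = "B" ∧ PySem.List.pyGetD cnt.1 ir.1 0 = 1 ∧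
            PySem.List.pyGetD cnt.2 j 0 = 1
        then acc ++ [(ir.1, j)] else acc) acc) []

-- ===== PRECONDITION & SPEC =====
-- helpers readable from the input: first-row width, number of 'B' in row i / column j
def pvW (M : List (List String)) : Nat := (M.getD 0 []).length
def pvRowCount (M : List (List String)) (i : Nat) : Nat := ((M.getD i []).take (pvW M)).count "B"
def pvColCount (M : List (List String)) (j : Nat) : Nat := (M.map (fun r => r.getD j "")).count "B"

-- Pre_ excludes: the empty matrix (A returns the int 0, not a list of pixels), rows shorter than the
-- first row (A raises IndexError), and grids with a 'B' whose row and column both hold a second 'B'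
-- (A raises ValueError removing the same pixel twice).
def Pre_lonely_pixels (M : List (List String)) : Prop :=
  M ≠ [] ∧ (∀ r ∈ M, pvW M ≤ r.length) ∧
    ∀ i ∈ List.range M.length, ∀ j ∈ List.range (pvW M),
      (M.getD i []).getD j "" = "B" → pvRowCount M i ≤ 1 ∨ pvColCount M j ≤ 1
instance (M : List (List String)) : Decidable (Pre_lonely_pixels M) := by
  unfold Pre_lonely_pixels; infer_instance

def pvWitness_lonely_pixels : List (List String) := [["B", "W"], ["W", "B"]]

def Spec_lonely_pixels (M : List (List String)) (out : List (Int × Int)) : Prop := out = lonely_pixels_alt M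
instance (M : List (List String)) (out : List (Int × Int)) : Decidable (Spec_lonely_pixels M out) := by unfold Spec_lonely_pixels; infer_instance

-- ===== CLAIM (what is proved, stated in full; the proofs are below) =====
def Claim_equal_lonely_pixels : Prop := ∀ (M : List (List String)), Dom_lonely_pixels M → Pre_lonely_pixels M → Spec_lonely_pixels M (lonely_pixels M)

-- ===== LEMMAS AND PROOFS =====

-- the common cell/pixel vocabulary both characterizations land in
def pvKC : Nat × Nat → Int × Int := fun p => ((p.1 : Int), (p.2 : Int))
def pvCells (M : List (List String)) : List (Nat × Nat) :=
  (List.range M.length).flatMap (fun i => (List.range (pvW M)).map (fun j => (i, j)))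
def pvIsB (M : List (List String)) (p : Nat × Nat) : Bool :=
  decide ((M.getD p.1 []).getD p.2 "" = "B")
def pvBs (M : List (List String)) : List (Nat × Nat) := (pvCells M).filter (pvIsB M)
def pvAllB (M : List (List String)) : List (Int × Int) := (pvBs M).map pvKC
def pvGrpR (M : List (List String)) (k : Int) : List (Int × Int) :=
  ((pvBs M).filter (fun p => (p.1 : Int) == k)).map pvKC
def pvGrpC (M : List (List String)) (k : Int) : List (Int × Int) :=
  ((pvBs M).filter (fun p => (p.2 : Int) == k)).map pvKC
def pvRowsD (M : List (List String)) : PySem.Dict Int (List (Int × Int)) :=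
  (pvBs M).foldl (fun d p => d.modify (p.1 : Int) [] (· ++ [pvKC p])) PySem.Dict.empty
def pvColsD (M : List (List String)) : PySem.Dict Int (List (Int × Int)) :=
  (pvBs M).foldl (fun d p => d.modify (p.2 : Int) [] (· ++ [pvKC p])) PySem.Dict.empty
def pvKeep (kvs : List (Int × List (Int × Int))) (q : Int × Int) : Bool :=
  kvs.all (fun kv => decide (kv.2.length ≤ 1) || !(kv.2.contains q))
def pvRes (M : List (List String)) : List (Int × Int) :=
  ((pvBs M).filter (fun p =>
      decide ((pvGrpR M (p.1 : Int)).length = 1) && decide ((pvGrpC M (p.2 : Int)).length = 1))).map pvKC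

lemma pvKC_inj : Function.Injective pvKC := by
  intro p q h
  simp only [pvKC, Prod.mk.injEq, Nat.cast_inj] at h
  exact Prod.ext h.1 h.2

lemma pvCells_nodup (M : List (List String)) : (pvCells M).Nodup := by
  have h : pvCells M = (List.range M.length) ×ˢ (List.range (pvW M)) := rfl
  rw [h]
  exact List.Nodup.product (List.nodup_range) (List.nodup_range)

lemma pvBs_nodup (M : List (List String)) : (pvBs M).Nodup := (pvCells_nodup M).filter _

lemma pvAllB_nodup (M : List (List String)) : (pvAllB M).Nodup :=
  List.Nodup.map pvKC_inj (pvBs_nodup M)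

-- nested index loops over the matrix are a single fold over the cell list
lemma pvNested {S : Type} (n w : Nat) (F : S → Nat → Nat → S) (init : S) :
    (List.range n).foldl (fun s i => (List.range w).foldl (fun s j => F s i j) s) init
      = ((List.range n).flatMap (fun i => (List.range w).map (fun j => (i, j)))).foldl
          (fun s p => F s p.1 p.2) init := by
  rw [List.foldl_flatMap]
  simp [List.foldl_map]

-- Prop-condition variants of the foldl/filter bridges (the library ones take Bool tests)
lemma pvFoldlFilterProp {α σ : Type} (P : α → Prop) [DecidablePred P] (f : σ → α → σ)
    (l : List α) (init : σ) :
    l.foldl (fun s x => if P x then f s x else s) init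
      = (l.filter (fun x => decide (P x))).foldl f init := by
  induction l generalizing init with
  | nil => rfl
  | cons x l ih =>
      by_cases h : P x <;> simp [h, ih]

lemma pvFoldAppendIf {α β : Type} (P : α → Prop) [DecidablePred P] (f : α → β)
    (l : List α) (acc : List β) :
    l.foldl (fun acc x => if P x then acc ++ [f x] else acc) acc
      = acc ++ (l.filter (fun x => decide (P x))).map f := by
  induction l generalizing acc with
  | nil => simp
  | cons x l ih =>
      by_cases h : P x <;> simp [h, ih]

lemma pvDecideSplit (A B C : Prop) [Decidable A] [Decidable B] [Decidable C] :
    decide (A ∧ B ∧ C) = ((decide B && decide C) && decide A) := by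
  by_cases hA : A <;> by_cases hB : B <;> by_cases hC : C <;> simp [hA, hB, hC]

-- the dict-building fold, via getD_foldl_modify_append through a map
lemma pvRowsD_getD (M : List (List String)) (k : Int) :
    (pvRowsD M).getD k [] = pvGrpR M k := by
  have h : pvRowsD M
      = ((pvBs M).map (fun p => (((p.1 : Nat) : Int), pvKC p))).foldl
          (fun d q => d.modify q.1 [] (· ++ [q.2])) PySem.Dict.empty := by
    rw [List.foldl_map]
    rfl
  rw [h, PySem.Dict.getD_foldl_modify_append]
  simp only [PySem.Dict.getD_empty, List.nil_append, List.filter_map, List.map_map]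
  rfl

lemma pvColsD_getD (M : List (List String)) (k : Int) :
    (pvColsD M).getD k [] = pvGrpC M k := by
  have h : pvColsD M
      = ((pvBs M).map (fun p => (((p.2 : Nat) : Int), pvKC p))).foldl
          (fun d q => d.modify q.1 [] (· ++ [q.2])) PySem.Dict.empty := by
    rw [List.foldl_map]
    rfl
  rw [h, PySem.Dict.getD_foldl_modify_append]
  simp only [PySem.Dict.getD_empty, List.nil_append, List.filter_map, List.map_map]
  rfl

lemma pvRowsD_keys_nodup (M : List (List String)) : (pvRowsD M).keys.Nodup :=
  PySem.Dict.nodup_keys_foldl_modify_key (pvBs M) (fun p => ((p.1 : Nat) : Int)) []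
    (fun _ p => (· ++ [pvKC p])) PySem.Dict.empty (by simp)

lemma pvColsD_keys_nodup (M : List (List String)) : (pvColsD M).keys.Nodup :=
  PySem.Dict.nodup_keys_foldl_modify_key (pvBs M) (fun p => ((p.2 : Nat) : Int)) []
    (fun _ p => (· ++ [pvKC p])) PySem.Dict.empty (by simp)

lemma pvMemGrpR (M : List (List String)) (p : Nat × Nat) (hp : p ∈ pvBs M) :
    pvKC p ∈ pvGrpR M (p.1 : Int) := by
  simp only [pvGrpR, List.mem_map]
  exact ⟨p, by simp [List.mem_filter, hp], rfl⟩

lemma pvMemGrpC (M : List (List String)) (p : Nat × Nat) (hp : p ∈ pvBs M) :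
    pvKC p ∈ pvGrpC M (p.2 : Int) := by
  simp only [pvGrpC, List.mem_map]
  exact ⟨p, by simp [List.mem_filter, hp], rfl⟩

lemma pvRowsD_mem_keys (M : List (List String)) (p : Nat × Nat) (hp : p ∈ pvBs M) :
    (p.1 : Int) ∈ (pvRowsD M).keys := by
  by_contra hk
  have hc : (pvRowsD M).contains ((p.1 : Nat) : Int) = false := by
    cases hcc : (pvRowsD M).contains ((p.1 : Nat) : Int)
    · rfl
    · rw [PySem.Dict.contains_iff_mem_keys] at hcc
      exact absurd hcc hk
  have h0 : (pvRowsD M).getD ((p.1 : Nat) : Int) [] = [] :=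
    PySem.Dict.getD_of_not_contains _ _ hc
  rw [pvRowsD_getD] at h0
  have hmem := pvMemGrpR M p hp
  rw [h0] at hmem
  simp at hmem

lemma pvColsD_mem_keys (M : List (List String)) (p : Nat × Nat) (hp : p ∈ pvBs M) :
    (p.2 : Int) ∈ (pvColsD M).keys := by
  by_contra hk
  have hc : (pvColsD M).contains ((p.2 : Nat) : Int) = false := by
    cases hcc : (pvColsD M).contains ((p.2 : Nat) : Int)
    · rfl
    · rw [PySem.Dict.contains_iff_mem_keys] at hcc
      exact absurd hcc hk
  have h0 : (pvColsD M).getD ((p.2 : Nat) : Int) [] = [] :=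
    PySem.Dict.getD_of_not_contains _ _ hc
  rw [pvColsD_getD] at h0
  have hmem := pvMemGrpC M p hp
  rw [h0] at hmem
  simp at hmem

-- the remove-loop on a duplicate-free list is a filter
lemma pvRemFold (v bs : List (Int × Int)) (hbs : bs.Nodup) :
    v.foldl (fun b p => (PySem.List.remove? b p).getD b) bs
      = bs.filter (fun p => !(v.contains p)) := by
  induction v generalizing bs with
  | nil => simp
  | cons q v ih =>
      rw [List.foldl_cons]
      by_cases hq : q ∈ bs
      · rw [PySem.List.remove?_eq_some_erase bs q hq]
        simp only [Option.getD_some]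
        rw [ih (bs.erase q) (hbs.erase q), hbs.erase_eq_filter q, List.filter_filter]
        apply List.filter_congr
        intro x hx
        by_cases hxq : x = q <;> simp [hxq, Bool.and_comm]
      · have h0 : PySem.List.remove? bs q = none := by
          rw [PySem.List.remove?_eq_none_iff]
          exact hq
        rw [h0]
        simp only [Option.getD_none]
        rw [ih bs hbs]
        apply List.filter_congr
        intro x hx
        have hne : x ≠ q := fun h => hq (h ▸ hx)
        simp [hne]

-- one full removal phase is a filter by pvKeep
lemma pvPhase (kvs : List (Int × List (Int × Int))) (bs : List (Int × Int)) (hbs : bs.Nodup) :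
    kvs.foldl (fun bs kv =>
        if 1 < kv.2.length then kv.2.foldl (fun bs p => (PySem.List.remove? bs p).getD bs) bs
        else bs) bs
      = bs.filter (pvKeep kvs) := by
  induction kvs generalizing bs with
  | nil =>
      rw [List.foldl_nil]
      exact (List.filter_eq_self.mpr (fun a _ => by simp [pvKeep])).symm
  | cons kv kvs ih =>
      rw [List.foldl_cons]
      by_cases h : 1 < kv.2.length
      · rw [if_pos h, pvRemFold kv.2 bs hbs, ih _ (hbs.filter _), List.filter_filter]
        have hd : decide (kv.2.length ≤ 1) = false := by simp; omega
        apply List.filter_congr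
        intro x hx
        simp [pvKeep, hd, Bool.and_comm]
      · rw [if_neg h, ih bs hbs]
        have hd : decide (kv.2.length ≤ 1) = true := by simp; omega
        apply List.filter_congr
        intro x hx
        simp [pvKeep, hd]

-- pvKeep over the groups dict is the count condition, for actual B pixels
lemma pvKeepR (M : List (List String)) (p : Nat × Nat) (hp : p ∈ pvBs M) :
    pvKeep (pvRowsD M).items (pvKC p) = decide ((pvGrpR M (p.1 : Int)).length ≤ 1) := by
  unfold pvKeep
  rw [PySem.Dict.items_eq_map_keys (pvRowsD M) (pvRowsD_keys_nodup M) [], List.all_map]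
  simp only [pvRowsD_getD]
  by_cases hle : (pvGrpR M (p.1 : Int)).length ≤ 1
  · rw [decide_eq_true hle, List.all_eq_true]
    intro k hk
    by_cases hkp : k = (p.1 : Int)
    · subst hkp
      simp [hle]
    · have hnm : pvKC p ∉ pvGrpR M k := by
        intro hmem
        rcases List.mem_map.mp hmem with ⟨r, hr, hrq⟩
        have hrp : r = p := pvKC_inj hrq
        subst hrp
        have := (List.mem_filter.mp hr).2
        simp only [beq_iff_eq] at this
        exact hkp this.symm
      simp [hnm]
  · rw [decide_eq_false hle, ← Bool.not_eq_true, List.all_eq_true]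
    intro hall
    have h1 := hall _ (pvRowsD_mem_keys M p hp)
    have h2 := pvMemGrpR M p hp
    simp [hle, h2] at h1

lemma pvKeepC (M : List (List String)) (p : Nat × Nat) (hp : p ∈ pvBs M) :
    pvKeep (pvColsD M).items (pvKC p) = decide ((pvGrpC M (p.2 : Int)).length ≤ 1) := by
  unfold pvKeep
  rw [PySem.Dict.items_eq_map_keys (pvColsD M) (pvColsD_keys_nodup M) [], List.all_map]
  simp only [pvColsD_getD]
  by_cases hle : (pvGrpC M (p.2 : Int)).length ≤ 1
  · rw [decide_eq_true hle, List.all_eq_true]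
    intro k hk
    by_cases hkp : k = (p.2 : Int)
    · subst hkp
      simp [hle]
    · have hnm : pvKC p ∉ pvGrpC M k := by
        intro hmem
        rcases List.mem_map.mp hmem with ⟨r, hr, hrq⟩
        have hrp : r = p := pvKC_inj hrq
        subst hrp
        have := (List.mem_filter.mp hr).2
        simp only [beq_iff_eq] at this
        exact hkp this.symm
      simp [hnm]
  · rw [decide_eq_false hle, ← Bool.not_eq_true, List.all_eq_true]
    intro hall
    have h1 := hall _ (pvColsD_mem_keys M p hp)
    have h2 := pvMemGrpC M p hp
    simp [hle, h2] at h1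

-- the scan of port A produces the B list and the two group dicts
lemma pvScanEq (M : List (List String)) :
    ((PySem.List.pyRange 0 (M.length : Int) 1).foldl (fun s i =>
        (PySem.List.pyRange 0 ((PySem.List.pyGetD M 0 []).length : Int) 1).foldl (fun s j =>
          if PySem.List.pyGetD (PySem.List.pyGetD M i []) j "" = "B" then
            (s.1 ++ [(i, j)],
             s.2.1.modify i [] (· ++ [(i, j)]),
             s.2.2.modify j [] (· ++ [(i, j)]))
          else s) s)
        (([] : List (Int × Int)),
         (PySem.Dict.empty : PySem.Dict Int (List (Int × Int))),
         (PySem.Dict.empty : PySem.Dict Int (List (Int × Int)))))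
      = (pvAllB M, pvRowsD M, pvColsD M) := by
  simp only [PySem.List.pyRange_zero_nat, List.foldl_map, PySem.List.pyGetD_natCast,
    PySem.List.pyGetD_zero]
  rw [show (M.getD 0 ([] : List String)).length = pvW M from rfl]
  rw [pvNested
    (S := List (Int × Int) × PySem.Dict Int (List (Int × Int)) × PySem.Dict Int (List (Int × Int)))
    M.length (pvW M)
    (fun s i j => if (M.getD i []).getD j "" = "B" then
        (s.1 ++ [((i : Int), (j : Int))],
         s.2.1.modify (i : Int) [] (· ++ [((i : Int), (j : Int))]),
         s.2.2.modify (j : Int) [] (· ++ [((i : Int), (j : Int))]))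
      else s)]
  rw [show ((List.range M.length).flatMap fun i => (List.range (pvW M)).map fun j => (i, j))
      = pvCells M from rfl]
  rw [pvFoldlFilterProp
    (σ := List (Int × Int) × PySem.Dict Int (List (Int × Int)) × PySem.Dict Int (List (Int × Int)))
    (fun p : Nat × Nat => (M.getD p.1 []).getD p.2 "" = "B")
    (fun s p =>
      (s.1 ++ [((p.1 : Int), (p.2 : Int))],
       s.2.1.modify (p.1 : Int) [] (· ++ [((p.1 : Int), (p.2 : Int))]),
       s.2.2.modify (p.2 : Int) [] (· ++ [((p.1 : Int), (p.2 : Int))])))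
    (pvCells M) ((([] : List (Int × Int)),
      (PySem.Dict.empty : PySem.Dict Int (List (Int × Int))),
      (PySem.Dict.empty : PySem.Dict Int (List (Int × Int)))))]
  rw [show ((pvCells M).filter fun p => decide ((M.getD p.1 []).getD p.2 "" = "B")) = pvBs M from rfl]
  rw [PySem.List.foldl_prod_mk
    (fun (l : List (Int × Int)) (p : Nat × Nat) => l ++ [((p.1 : Int), (p.2 : Int))])
    (fun (t : PySem.Dict Int (List (Int × Int)) × PySem.Dict Int (List (Int × Int))) (p : Nat × Nat) =>
      (t.1.modify (p.1 : Int) [] (· ++ [((p.1 : Int), (p.2 : Int))]),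
       t.2.modify (p.2 : Int) [] (· ++ [((p.1 : Int), (p.2 : Int))])))
    (pvBs M) [] (PySem.Dict.empty, PySem.Dict.empty)]
  rw [PySem.List.foldl_prod_mk
    (fun (d : PySem.Dict Int (List (Int × Int))) (p : Nat × Nat) =>
      d.modify (p.1 : Int) [] (· ++ [((p.1 : Int), (p.2 : Int))]))
    (fun (d : PySem.Dict Int (List (Int × Int))) (p : Nat × Nat) =>
      d.modify (p.2 : Int) [] (· ++ [((p.1 : Int), (p.2 : Int))]))
    (pvBs M) PySem.Dict.empty PySem.Dict.empty]
  rw [PySem.List.foldl_append_singleton_eq_map]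
  rfl

-- characterization of port A
lemma pvAchar (M : List (List String)) : lonely_pixels M = pvRes M := by
  unfold lonely_pixels
  by_cases hM : M = []
  · subst hM
    simp [pvRes, pvBs, pvCells]
  · rw [if_neg hM]
    dsimp only
    rw [pvScanEq]
    rw [pvPhase (pvRowsD M).items (pvAllB M) (pvAllB_nodup M),
      pvPhase (pvColsD M).items _ ((pvAllB_nodup M).filter _), List.filter_filter]
    unfold pvAllB
    rw [List.filter_map]
    unfold pvRes
    apply congrArg
    apply List.filter_congr
    intro p hp
    simp only [Function.comp_apply]
    rw [pvKeepR M p hp, pvKeepC M p hp]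
    have hr1 := List.length_pos_of_mem (pvMemGrpR M p hp)
    have hc1 := List.length_pos_of_mem (pvMemGrpC M p hp)
    have er : decide ((pvGrpR M (p.1 : Int)).length ≤ 1)
        = decide ((pvGrpR M (p.1 : Int)).length = 1) :=
      decide_eq_decide.mpr (by omega)
    have ec : decide ((pvGrpC M (p.2 : Int)).length ≤ 1)
        = decide ((pvGrpC M (p.2 : Int)).length = 1) :=
      decide_eq_decide.mpr (by omega)
    rw [er, ec]
    exact Bool.and_comm _ _

-- enumerate as a map over indices
lemma pvEnumEq {α : Type} (xs : List α) (d : α) (s : Int) :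
    PySem.List.enumerate xs s
      = (List.range xs.length).map (fun i : Nat => (s + (i : Int), xs.getD i d)) := by
  induction xs generalizing s with
  | nil => simp [PySem.List.enumerate]
  | cons x xs ih =>
      rw [PySem.List.enumerate_cons, ih (s + 1), List.length_cons, List.range_succ_eq_map,
        List.map_cons, List.map_map]
      refine congrArg₂ List.cons (by simp) (List.map_congr_left fun a _ => ?_)
      simp only [Function.comp_apply, List.getD_cons_succ]
      congr 1
      push_cast
      ring

-- replicate read back
lemma pvReplGetD (n k : Nat) : (List.replicate n (0 : Int)).getD k 0 = 0 := by
  rw [List.getD_eq_getElem?_getD, List.getElem?_replicate]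
  by_cases h : k < n <;> simp [h]

-- the count-vector fold reads back as countP
lemma pvIncrFold {α : Type} (l : List α) (key : α → Nat) (v : List Int) (i : Nat)
    (hlen : ∀ x ∈ l, key x < v.length) :
    (l.foldl (fun v x => v.set (key x) (v.getD (key x) 0 + 1)) v).getD i 0
      = v.getD i 0 + (l.countP (fun x => key x == i) : Int) := by
  revert hlen
  induction l generalizing v with
  | nil => intro _; simp
  | cons x l ih =>
      intro hlen
      have hx : key x < v.length := hlen x (List.mem_cons_self)
      rw [List.foldl_cons, ih _ (fun y hy => by
        rw [List.length_set]; exact hlen y (List.mem_cons_of_mem _ hy)), List.countP_cons]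
      by_cases h : key x = i
      · subst h
        have hset : (v.set (key x) (v.getD (key x) 0 + 1)).getD (key x) 0
            = v.getD (key x) 0 + 1 := by
          simp [List.getD_eq_getElem?_getD, hx]
        rw [hset]
        simp only [beq_self_eq_true, if_pos]
        push_cast
        ring
      · have hset : (v.set (key x) (v.getD (key x) 0 + 1)).getD i 0 = v.getD i 0 := by
          simp [List.getD_eq_getElem?_getD, h]
        rw [hset]
        have hb : (key x == i) = false := by simp [h]
        simp [hb]

lemma pvBsLtFst (M : List (List String)) (p : Nat × Nat) (hp : p ∈ pvBs M) :
    p.1 < M.length := by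
  have hc := (List.mem_filter.mp hp).1
  simp only [pvCells, List.mem_flatMap, List.mem_map, List.mem_range] at hc
  rcases hc with ⟨i, hi, j, hj, hij⟩
  rw [← hij]
  exact hi

lemma pvBsLtSnd (M : List (List String)) (p : Nat × Nat) (hp : p ∈ pvBs M) :
    p.2 < pvW M := by
  have hc := (List.mem_filter.mp hp).1
  simp only [pvCells, List.mem_flatMap, List.mem_map, List.mem_range] at hc
  rcases hc with ⟨i, hi, j, hj, hij⟩
  rw [← hij]
  exact hj

-- group lengths as countP over the B list
lemma pvGrpRLen (M : List (List String)) (i : Nat) :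
    (pvGrpR M (i : Int)).length = (pvBs M).countP (fun q => q.1 == i) := by
  rw [pvGrpR, List.length_map, ← List.countP_eq_length_filter]
  apply List.countP_congr
  intro q _
  rw [Bool.eq_iff_iff]
  simp [Nat.cast_inj]

lemma pvGrpCLen (M : List (List String)) (j : Nat) :
    (pvGrpC M (j : Int)).length = (pvBs M).countP (fun q => q.2 == j) := by
  rw [pvGrpC, List.length_map, ← List.countP_eq_length_filter]
  apply List.countP_congr
  intro q _
  rw [Bool.eq_iff_iff]
  simp [Nat.cast_inj]

-- characterization of port B
lemma pvBchar (M : List (List String)) : lonely_pixels_alt M = pvRes M := by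
  unfold lonely_pixels_alt
  by_cases hM : M = []
  · subst hM
    simp [pvRes, pvBs, pvCells]
  · rw [if_neg hM]
    dsimp only
    have he := pvEnumEq M ([] : List String) 0
    simp only [he, List.foldl_map, zero_add, PySem.List.pyRange_zero_nat,
      PySem.List.pyGetD_natCast, PySem.List.pySetD_natCast, PySem.List.pyGetD_zero]
    rw [show (M.getD 0 ([] : List String)).length = pvW M from rfl]
    rw [pvNested (S := List Int × List Int) M.length (pvW M)
      (fun s i j => if (M.getD i []).getD j "" = "B" then
          (s.1.set i (s.1.getD i 0 + 1), s.2.set j (s.2.getD j 0 + 1)) else s)]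
    rw [show ((List.range M.length).flatMap fun i => (List.range (pvW M)).map fun j => (i, j))
        = pvCells M from rfl]
    rw [pvFoldlFilterProp (fun p : Nat × Nat => (M.getD p.1 []).getD p.2 "" = "B")
      (fun (s : List Int × List Int) (p : Nat × Nat) =>
        (s.1.set p.1 (s.1.getD p.1 0 + 1), s.2.set p.2 (s.2.getD p.2 0 + 1)))
      (pvCells M) (List.replicate M.length (0 : Int), List.replicate (pvW M) (0 : Int))]
    rw [show ((pvCells M).filter fun p => decide ((M.getD p.1 []).getD p.2 "" = "B")) = pvBs M from rfl]
    rw [PySem.List.foldl_prod_mk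
      (fun (v : List Int) (p : Nat × Nat) => v.set p.1 (v.getD p.1 0 + 1))
      (fun (v : List Int) (p : Nat × Nat) => v.set p.2 (v.getD p.2 0 + 1))
      (pvBs M) (List.replicate M.length (0 : Int)) (List.replicate (pvW M) (0 : Int))]
    rw [pvNested (S := List (Int × Int)) M.length (pvW M)
      (fun acc i j => if (M.getD i []).getD j "" = "B" ∧
          (List.foldl (fun (v : List Int) (q : Nat × Nat) => v.set q.1 (v.getD q.1 0 + 1))
            (List.replicate M.length (0 : Int)) (pvBs M)).getD i 0 = 1 ∧
          (List.foldl (fun (v : List Int) (q : Nat × Nat) => v.set q.2 (v.getD q.2 0 + 1))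
            (List.replicate (pvW M) (0 : Int)) (pvBs M)).getD j 0 = 1
        then acc ++ [((i : Int), (j : Int))] else acc)]
    rw [show ((List.range M.length).flatMap fun i => (List.range (pvW M)).map fun j => (i, j))
        = pvCells M from rfl]
    rw [pvFoldAppendIf (fun p : Nat × Nat => (M.getD p.1 []).getD p.2 "" = "B" ∧
          (List.foldl (fun (v : List Int) (q : Nat × Nat) => v.set q.1 (v.getD q.1 0 + 1))
            (List.replicate M.length (0 : Int)) (pvBs M)).getD p.1 0 = 1 ∧
          (List.foldl (fun (v : List Int) (q : Nat × Nat) => v.set q.2 (v.getD q.2 0 + 1))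
            (List.replicate (pvW M) (0 : Int)) (pvBs M)).getD p.2 0 = 1)
      (fun p : Nat × Nat => ((p.1 : Int), (p.2 : Int))) (pvCells M) []]
    rw [List.nil_append]
    simp only [pvDecideSplit]
    rw [← List.filter_filter]
    rw [show ((pvCells M).filter fun p => decide ((M.getD p.1 []).getD p.2 "" = "B")) = pvBs M from rfl]
    unfold pvRes
    apply congrArg
    apply List.filter_congr
    intro p hp
    have hr : (List.foldl (fun (v : List Int) (q : Nat × Nat) => v.set q.1 (v.getD q.1 0 + 1))
        (List.replicate M.length (0 : Int)) (pvBs M)).getD p.1 0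
        = ((pvBs M).countP (fun q => q.1 == p.1) : Int) := by
      rw [pvIncrFold (pvBs M) Prod.fst _ p.1
        (fun y hy => by rw [List.length_replicate]; exact pvBsLtFst M y hy)]
      rw [pvReplGetD]
      ring
    have hc : (List.foldl (fun (v : List Int) (q : Nat × Nat) => v.set q.2 (v.getD q.2 0 + 1))
        (List.replicate (pvW M) (0 : Int)) (pvBs M)).getD p.2 0
        = ((pvBs M).countP (fun q => q.2 == p.2) : Int) := by
      rw [pvIncrFold (pvBs M) Prod.snd _ p.2
        (fun y hy => by rw [List.length_replicate]; exact pvBsLtSnd M y hy)]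
      rw [pvReplGetD]
      ring
    rw [hr, hc]
    have er : decide (((pvBs M).countP (fun q => q.1 == p.1) : Int) = 1)
        = decide ((pvGrpR M (p.1 : Int)).length = 1) :=
      decide_eq_decide.mpr (by rw [pvGrpRLen]; omega)
    have ec : decide (((pvBs M).countP (fun q => q.2 == p.2) : Int) = 1)
        = decide ((pvGrpC M (p.2 : Int)).length = 1) :=
      decide_eq_decide.mpr (by rw [pvGrpCLen]; omega)
    rw [er, ec]

-- ===== VERDICT (by name: the statement is the Claim_ definition above) =====
theorem lonely_pixels_spec : Claim_equal_lonely_pixels := by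
  intro M _ _
  unfold Spec_lonely_pixels
  rw [pvAchar, pvBchar]
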